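-- pv_equiv track=rewrite | github.com/posl/comment_recommendation | script/split_gen/4_time/zh/188_C/4.py | getSecond
-- ===== SOURCE A (Python) =====
-- def getSecond(l):
--     if len(l) == 2:
--         if l[0][1] > l[1][1]:
--             return l[1][0]
--         else:
--             return l[0][0]
--     else:
--         newl = []
--         for i in range(0, len(l), 2):
--             if l[i][1] > l[i+1][1]:
--                 newl.append(l[i])
--             else:
--                 newl.append(l[i+1])
--         return getSecond(newl)
-- ===== SOURCE B (Python) =====
-- def getSecond(l):
--     def winner(seg):
--         if len(seg) == 1:
--             return seg[0]
--         m = len(seg) // 2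
--         a = winner(seg[:m])
--         b = winner(seg[m:])
--         return a if a[1] > b[1] else b
--     m = len(l) // 2
--     a = winner(l[:m])
--     b = winner(l[m:])
--     return b[0] if a[1] > b[1] else a[0]
-- ===== Notes on version B (the rewrite author's own statement) =====
-- stated objective: alternative
-- what changed: A reduces the whole list round by round (each recursive call rebuilds the next tournament round by an indexed append loop over range(0,len,2)); B runs the same tournament as a divide-and-conquer recursion on contiguous halves (winner(seg[:m]) vs winner(seg[m:])) and takes the loser of the final match, with no index arithmetic and no intermediate round lists.
import Mathlib
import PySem

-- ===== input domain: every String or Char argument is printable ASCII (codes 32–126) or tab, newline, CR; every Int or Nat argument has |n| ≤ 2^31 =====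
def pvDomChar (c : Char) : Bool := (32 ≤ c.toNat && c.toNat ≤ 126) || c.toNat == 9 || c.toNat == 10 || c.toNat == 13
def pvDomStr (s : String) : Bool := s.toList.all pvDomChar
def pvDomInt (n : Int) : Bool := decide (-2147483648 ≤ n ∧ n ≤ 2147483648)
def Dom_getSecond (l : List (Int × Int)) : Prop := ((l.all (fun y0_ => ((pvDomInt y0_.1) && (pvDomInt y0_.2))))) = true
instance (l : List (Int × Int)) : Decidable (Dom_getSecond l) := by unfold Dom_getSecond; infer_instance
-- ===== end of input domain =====

-- B runs the same tournament as a divide-and-conquer recursion on contiguous halves instead of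
-- A's round-by-round reduction with an indexed append loop; equivalence of the return value is
-- proved on power-of-two lengths ≥ 2, exactly where Python A returns without an exception.

-- ===== PORT A =====
-- l[i] of A, with a junk default: A only reaches in-range indices on inputs in Pre_.
def pvGet (l : List (Int × Int)) (i : Int) : Int × Int := PySem.List.pyGetD l i (0, 0)

-- the body of A's `newl = []; for i in range(0, len(l), 2): newl.append(...)`
def pairRound (l : List (Int × Int)) : List (Int × Int) :=
  (PySem.List.pyRange 0 (l.length : Int) 2).foldl
    (fun newl i =>
      newl ++ [if (pvGet l i).2 > (pvGet l (i + 1)).2 then pvGet l i else pvGet l (i + 1)]) []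

-- termination fact for the port (Python A raises or recurses forever on lengths 0 and 1)
theorem pairRound_length (l : List (Int × Int)) :
    (pairRound l).length = (l.length + 1) / 2 := by
  unfold pairRound
  rw [PySem.List.pyRange_of_pos 0 (l.length : Int) (by norm_num),
      PySem.List.foldl_append_singleton_eq_map]
  rcases Nat.eq_zero_or_pos l.length with h | h
  · simp [h]
  · rw [if_pos (by exact_mod_cast h)]
    simp only [List.nil_append, List.length_map, List.length_range]
    omega

def getSecond (l : List (Int × Int)) : Int :=
  if l.length == 2 then
    if (pvGet l 0).2 > (pvGet l 1).2 then (pvGet l 1).1 else (pvGet l 0).1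
  else if l.length ≤ 1 then 0  -- guard for totality only: Python A raises/diverges here (outside Pre_)
  else getSecond (pairRound l)
termination_by l.length
decreasing_by
  rw [pairRound_length]
  simp_all
  omega

-- ===== PORT B =====
-- the inner helper `winner(seg)`: seg[0] on a singleton is its head (exact); seg[:m] / seg[m:]
-- are PySem slices with the nonnegative bound m = len(seg)//2
def winnerB (seg : List (Int × Int)) : Int × Int :=
  if seg.length = 1 then seg.headD (0, 0)
  else if seg.length = 0 then (0, 0)  -- guard for totality only: Python B recurses forever here (outside Pre_)
  else
    let m : Nat := seg.length / 2
    let a := winnerB (PySem.List.slice seg none (some (m : Int)))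
    let b := winnerB (PySem.List.slice seg (some (m : Int)) none)
    if a.2 > b.2 then a else b
termination_by seg.length
decreasing_by
  · rw [PySem.List.slice_to_natCast]
    simp only [List.length_take]
    omega
  · rw [PySem.List.slice_from_natCast]
    simp only [List.length_drop]
    omega

def getSecond_alt (l : List (Int × Int)) : Int :=
  let m : Nat := l.length / 2
  let a := winnerB (PySem.List.slice l none (some (m : Int)))
  let b := winnerB (PySem.List.slice l (some (m : Int)) none)
  if a.2 > b.2 then b.1 else a.1

-- ===== PRECONDITION & SPEC =====
-- Pre_: exactly the inputs on which Python A returns: length a power of two, at least 2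
-- (an odd length ≥ 1 at any round raises IndexError; length 0 recurses forever).
def Pre_getSecond (l : List (Int × Int)) : Prop :=
  2 ≤ l.length ∧ 2 ^ Nat.log2 l.length = l.length
instance (l : List (Int × Int)) : Decidable (Pre_getSecond l) := by
  unfold Pre_getSecond; infer_instance

def pvWitness_getSecond : (List (Int × Int)) := [(1, 1), (2, 2)]

def Spec_getSecond (l : List (Int × Int)) (out : Int) : Prop := out = getSecond_alt l
instance (l : List (Int × Int)) (out : Int) : Decidable (Spec_getSecond l out) := by
  unfold Spec_getSecond; infer_instance

-- ===== CLAIM (what is proved, stated in full; the proof is below) =====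
def Claim_equal_getSecond : Prop :=
  ∀ (l : List (Int × Int)), Dom_getSecond l → Pre_getSecond l → Spec_getSecond l (getSecond l)

-- ===== LEMMAS AND PROOFS =====
-- the match rule, proof-side shorthand
def cmb (a b : Int × Int) : Int × Int := if a.2 > b.2 then a else b

theorem pairRound_nil : pairRound [] = [] := by
  have := pairRound_length ([] : List (Int × Int))
  exact List.eq_nil_of_length_eq_zero (by simpa using this)

-- A's indexed round as a map over List.range
theorem pairRound_eq_map (l : List (Int × Int)) :
    pairRound l = (List.range ((l.length + 1) / 2)).map
      (fun k => cmb (l.getD (2 * k) (0, 0)) (l.getD (2 * k + 1) (0, 0))) := by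
  unfold pairRound
  rw [PySem.List.pyRange_of_pos 0 (l.length : Int) (by norm_num),
      PySem.List.foldl_append_singleton_eq_map, List.nil_append, List.map_map]
  rcases Nat.eq_zero_or_pos l.length with h | h
  · simp [h]
  · rw [if_pos (by exact_mod_cast h)]
    have harg : (((l.length : Int) - 0 + 2 - 1) / 2).toNat = (l.length + 1) / 2 := by
      omega
    rw [harg]
    refine List.map_congr_left ?_
    intro k _
    simp only [Function.comp_apply, cmb, pvGet]
    have h1 : (0 : Int) + 2 * (k : Int) = ((2 * k : Nat) : Int) := by push_cast; ring
    rw [h1]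
    have h2 : ((2 * k : Nat) : Int) + 1 = ((2 * k + 1 : Nat) : Int) := by push_cast; ring
    rw [h2, PySem.List.pyGetD_natCast, PySem.List.pyGetD_natCast]

theorem pairRound_cons2 (a b : Int × Int) (rest : List (Int × Int)) :
    pairRound (a :: b :: rest) = cmb a b :: pairRound rest := by
  rw [pairRound_eq_map, pairRound_eq_map]
  have hlen : ((a :: b :: rest).length + 1) / 2 = (rest.length + 1) / 2 + 1 := by
    simp; omega
  rw [hlen, List.range_succ_eq_map, List.map_cons, List.map_map]
  congr 1

theorem pairRound_append (l1 l2 : List (Int × Int)) (h : l1.length % 2 = 0) :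
    pairRound (l1 ++ l2) = pairRound l1 ++ pairRound l2 := by
  match l1 with
  | [] => simp [pairRound_nil]
  | [a] => simp at h
  | a :: b :: t =>
    rw [List.cons_append, List.cons_append, pairRound_cons2, pairRound_cons2,
        pairRound_append t l2 (by simp only [List.length_cons] at h; omega), List.cons_append]

-- winnerB unfolded on segments of length ≥ 2
theorem winnerB_split (seg : List (Int × Int)) (h : 2 ≤ seg.length) :
    winnerB seg = cmb (winnerB (seg.take (seg.length / 2))) (winnerB (seg.drop (seg.length / 2))) := by
  conv_lhs => rw [winnerB]
  simp only [PySem.List.slice_to_natCast, PySem.List.slice_from_natCast]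
  rw [if_neg (by omega), if_neg (by omega)]
  rfl

-- a list of length 2 is a literal pair
theorem exists_pair (l : List (Int × Int)) (h : l.length = 2) :
    ∃ a b, l = [a, b] := by
  match l with
  | [a, b] => exact ⟨a, b, rfl⟩
  | [] => simp at h
  | [a] => simp at h
  | a :: b :: c :: t => simp only [List.length_cons] at h; omega

theorem winnerB_singleton (a : Int × Int) : winnerB [a] = a := by
  rw [winnerB]; rfl

theorem winnerB_pair (a b : Int × Int) : winnerB [a, b] = cmb a b := by
  rw [winnerB_split [a, b] (by simp)]
  simp [winnerB_singleton]

-- one round of A commutes with B's winner on power-of-two lengths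
theorem winnerB_pairRound : ∀ (k : Nat) (seg : List (Int × Int)),
    seg.length = 2 ^ (k + 1) → winnerB (pairRound seg) = winnerB seg := by
  intro k
  induction k with
  | zero =>
    intro seg hl
    obtain ⟨a, b, rfl⟩ := exists_pair seg (by simpa using hl)
    rw [pairRound_cons2, pairRound_nil, winnerB_singleton, winnerB_pair]
  | succ k IH =>
    intro seg hl
    set m := 2 ^ (k + 1) with hm
    have hlen : seg.length = m + m := by rw [hl, hm]; ring
    have ht : (seg.take m).length = m := by simp [hlen]
    have hd : (seg.drop m).length = m := by simp [hlen]
    have hsplit : pairRound seg = pairRound (seg.take m) ++ pairRound (seg.drop m) := by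
      conv_lhs => rw [← List.take_append_drop m seg]
      exact pairRound_append _ _ (by rw [ht, hm]; simp [Nat.pow_succ, Nat.mul_mod_left])
    have hPRt : (pairRound (seg.take m)).length = 2 ^ k := by
      rw [pairRound_length, ht, hm]; omega
    have hPRd : (pairRound (seg.drop m)).length = 2 ^ k := by
      rw [pairRound_length, hd, hm]; omega
    have hPRlen : (pairRound seg).length = 2 ^ k + 2 ^ k := by
      rw [hsplit, List.length_append, hPRt, hPRd]
    have h2 : (2:Nat) ≤ 2 ^ k + 2 ^ k := by have := Nat.one_le_two_pow (n := k); omega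
    rw [winnerB_split (pairRound seg) (by omega)]
    rw [hPRlen]
    have hhalf : (2 ^ k + 2 ^ k) / 2 = 2 ^ k := by omega
    rw [hhalf, hsplit, List.take_append_of_le_length (by omega), List.take_of_length_le (by omega),
        List.drop_append_of_le_length (by omega), List.drop_of_length_le (by omega), List.nil_append]
    rw [IH (seg.take m) ht, IH (seg.drop m) hd,
        winnerB_split seg (by rw [hlen]; have := Nat.one_le_two_pow (n := k + 1); omega), hlen]
    have hmm : (m + m) / 2 = m := by omega
    rw [hmm]

-- B's top level in terms of winnerB on the two halves
theorem alt_eq (l : List (Int × Int)) :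
    getSecond_alt l =
      (let a := winnerB (l.take (l.length / 2));
       let b := winnerB (l.drop (l.length / 2));
       if a.2 > b.2 then b.1 else a.1) := by
  unfold getSecond_alt
  simp only [PySem.List.slice_to_natCast, PySem.List.slice_from_natCast]

-- the two disciplines meet on every power-of-two length ≥ 2
theorem getSecond_eq_alt_pow : ∀ (k : Nat) (l : List (Int × Int)),
    l.length = 2 ^ (k + 1) → getSecond l = getSecond_alt l := by
  intro k
  induction k with
  | zero =>
    intro l hl
    obtain ⟨a, b, rfl⟩ := exists_pair l (by simpa using hl)
    rw [getSecond, alt_eq]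
    simp [winnerB_singleton, pvGet, PySem.List.pyGetD]
  | succ k IH =>
    intro l hl
    have h4 : 4 ≤ l.length := by
      rw [hl]
      calc 4 = 2 ^ 2 := by norm_num
        _ ≤ 2 ^ (k + 2) := Nat.pow_le_pow_right (by norm_num) (by omega)
    have hnext : (pairRound l).length = 2 ^ (k + 1) := by
      rw [pairRound_length, hl, pow_succ 2 (k + 1)]; omega
    rw [getSecond, if_neg (by simp; omega), if_neg (by omega), IH (pairRound l) hnext]
    -- getSecond_alt (pairRound l) = getSecond_alt l
    set m := 2 ^ (k + 1) with hm
    have hlen : l.length = m + m := by rw [hl, hm]; ring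
    have ht : (l.take m).length = m := by simp [hlen]
    have hd : (l.drop m).length = m := by simp [hlen]
    have hsplit : pairRound l = pairRound (l.take m) ++ pairRound (l.drop m) := by
      conv_lhs => rw [← List.take_append_drop m l]
      exact pairRound_append _ _ (by rw [ht, hm]; simp [Nat.pow_succ, Nat.mul_mod_left])
    have hPRt : (pairRound (l.take m)).length = 2 ^ k := by
      rw [pairRound_length, ht, hm]; omega
    have hPRd : (pairRound (l.drop m)).length = 2 ^ k := by
      rw [pairRound_length, hd, hm]; omega
    rw [alt_eq, alt_eq]
    have hPRlen : (pairRound l).length = 2 ^ k + 2 ^ k := by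
      rw [hsplit, List.length_append, hPRt, hPRd]
    rw [hPRlen]
    have hhalf : (2 ^ k + 2 ^ k) / 2 = 2 ^ k := by omega
    rw [hhalf, hsplit, List.take_append_of_le_length (by omega), List.take_of_length_le (by omega),
        List.drop_append_of_le_length (by omega), List.drop_of_length_le (by omega), List.nil_append]
    rw [winnerB_pairRound k (l.take m) ht, winnerB_pairRound k (l.drop m) hd, hlen]
    have hmm : (m + m) / 2 = m := by omega
    rw [hmm]

-- ===== VERDICT (by name: the statements are the Claim_ definitions above) =====
theorem getSecond_spec : Claim_equal_getSecond := by
  intro l _ hpre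
  obtain ⟨h2, hpow⟩ := hpre
  unfold Spec_getSecond
  have hk : 1 ≤ Nat.log2 l.length := by
    rcases Nat.eq_zero_or_pos (Nat.log2 l.length) with h0 | h0
    · rw [h0, pow_zero] at hpow; omega
    · exact h0
  have hlen : l.length = 2 ^ (Nat.log2 l.length - 1 + 1) := by
    rw [Nat.sub_add_cancel hk]; exact hpow.symm
  exact getSecond_eq_alt_pow (Nat.log2 l.length - 1) l hlen
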